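-- pv_equiv track=rewrite | github.com/PurthaShaariyaar/OA | sameSub.py | sameSub
-- ===== SOURCE A (Python) =====
-- def sameSub(s, t, K):
--   n = len(s)
--   max_length = 0
--   current_cost = 0
--   left_pointer = 0
--
--   for right_pointer in range(n):
--     current_cost += abs(ord(s[right_pointer]) - ord(t[right_pointer]))
--
--     while current_cost > K:
--       current_cost -= abs(ord(s[left_pointer]) - ord(t[left_pointer]))
--       left_pointer += 1
--
--     max_length = max(max_length, right_pointer - left_pointer + 1)
--
--   return max_length
-- ===== SOURCE B (Python) =====
-- def sameSub(s, t, K):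
--   n = len(s)
--   costs = [abs(ord(s[i]) - ord(t[i])) for i in range(n)]
--   prefix = [0]
--   for c in costs:
--     prefix.append(prefix[-1] + c)
--   best = 0
--   for right in range(n):
--     target = prefix[right + 1] - K
--     lo, hi = 0, n + 1
--     while lo < hi:
--       mid = (lo + hi) // 2
--       if prefix[mid] < target:
--         lo = mid + 1
--       else:
--         hi = mid
--     best = max(best, right - lo + 1)
--   return best
-- ===== Notes on version B (the rewrite author's own statement) =====
-- stated objective: alternative
-- what changed: Replaces the amortized sliding-window (running cost, two moving pointers) by precomputed prefix sums of the per-index costs plus a hand-written binary search per right endpoint for the leftmost feasible window start.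
-- crash fix: On every nonempty s with K < 0 (and t at least as long as s) A raises IndexError because its inner while loop drives the left pointer past the end of s, while B returns 0, the length of the longest (empty) affordable window. — e.g. on sameSub("ab", "cd", -1): A raises IndexError, B returns 0
import Mathlib
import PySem

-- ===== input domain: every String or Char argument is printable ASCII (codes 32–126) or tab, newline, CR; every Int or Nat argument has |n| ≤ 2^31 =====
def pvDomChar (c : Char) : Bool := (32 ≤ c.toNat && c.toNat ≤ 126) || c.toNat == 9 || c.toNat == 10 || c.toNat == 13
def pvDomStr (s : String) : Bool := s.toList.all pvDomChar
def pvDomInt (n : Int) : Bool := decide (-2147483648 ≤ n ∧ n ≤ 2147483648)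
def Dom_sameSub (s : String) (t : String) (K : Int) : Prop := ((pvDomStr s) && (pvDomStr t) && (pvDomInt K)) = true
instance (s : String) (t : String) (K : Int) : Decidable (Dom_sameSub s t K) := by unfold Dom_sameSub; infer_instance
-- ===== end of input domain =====

-- B replaces A's amortized sliding window by prefix sums + a binary search per right endpoint;
-- same value wherever A returns (alternative decomposition, not faster).

-- ===== PORT A =====
-- inner `while current_cost > K: ...` of A; the extra `left < cs.length` guard only
-- makes the recursion total (Python raises IndexError exactly there; excluded by Pre_)
def sameSubWhile (cs ct : List Char) (K : Int) : Nat → Int → Nat → Int × Nat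
  | 0, cost, left => (cost, left)
  | fuel + 1, cost, left =>
    if K < cost ∧ left < cs.length then
      sameSubWhile cs ct K fuel
        (cost - |((PySem.List.pyGetD cs (left : Int) ' ').toNat : Int) -
                ((PySem.List.pyGetD ct (left : Int) ' ').toNat : Int)|)
        (left + 1)
    else (cost, left)

-- one iteration of A's `for right_pointer in range(n)`; state = (max_length, current_cost, left_pointer)
def stepA (cs ct : List Char) (K : Int) (st : Int × Int × Nat) (r : Nat) : Int × Int × Nat :=
  let cost := st.2.1 + |((PySem.List.pyGetD cs (r : Int) ' ').toNat : Int) -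
                       ((PySem.List.pyGetD ct (r : Int) ' ').toNat : Int)|
  let w := sameSubWhile cs ct K (cs.length + 1) cost st.2.2
  (max st.1 ((r : Int) - (w.2 : Int) + 1), w.1, w.2)

def sameSub (s : String) (t : String) (K : Int) : Int :=
  ((List.range s.toList.length).foldl (stepA s.toList t.toList K) (0, 0, 0)).1

-- ===== PORT B =====
-- B's `while lo < hi` binary search (bisect_left on prefix)
def bisectLoop (P : List Int) (target : Int) : Nat → Nat → Nat → Nat
  | 0, lo, _ => lo
  | fuel + 1, lo, hi =>
    if lo < hi then
      let mid := (lo + hi) / 2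
      if PySem.List.pyGetD P (mid : Int) 0 < target then bisectLoop P target fuel (mid + 1) hi
      else bisectLoop P target fuel lo mid
    else lo

-- one iteration of B's `for right in range(n)`
def stepB (P : List Int) (n : Nat) (K : Int) (best : Int) (r : Nat) : Int :=
  let target := PySem.List.pyGetD P ((r : Int) + 1) 0 - K
  let lo := bisectLoop P target (n + 2) 0 (n + 1)
  max best ((r : Int) - (lo : Int) + 1)

def sameSub_alt (s : String) (t : String) (K : Int) : Int :=
  let cs := s.toList
  let ct := t.toList
  let n := cs.length
  let costs := (List.range n).map (fun (i : Nat) =>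
    |((PySem.List.pyGetD cs (i : Int) ' ').toNat : Int) -
     ((PySem.List.pyGetD ct (i : Int) ' ').toNat : Int)|)
  let pref := costs.foldl (fun acc c => acc ++ [PySem.List.pyGetD acc (-1) 0 + c]) [0]
  (List.range n).foldl (stepB pref n K) 0

-- ===== PRECONDITION & SPEC =====
-- Pre_ excludes exactly the inputs where A raises IndexError: t shorter than s
-- (both programs index t[i] for i < len(s)), and K < 0 with nonempty s (A's while
-- loop then drives left_pointer past the end of s on the last iteration).
def Pre_sameSub (s : String) (t : String) (K : Int) : Prop :=
  s.length ≤ t.length ∧ (0 ≤ K ∨ s = "")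
instance (s : String) (t : String) (K : Int) : Decidable (Pre_sameSub s t K) := by
  unfold Pre_sameSub; infer_instance

def pvWitness_sameSub : String × String × Int := ("abc", "axc", 5)

-- On every nonempty s with K < 0 (and t at least as long as s) A raises IndexError
-- (left pointer runs past the end of s), while B returns 0, the length of the
-- longest (empty) affordable window (checked by theorem sameSub_raises at the bottom).
def Raises_sameSub (s : String) (t : String) (K : Int) : Prop :=
  s ≠ "" ∧ K < 0 ∧ s.length ≤ t.length
instance (s : String) (t : String) (K : Int) : Decidable (Raises_sameSub s t K) := by
  unfold Raises_sameSub; infer_instance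
def pvRaiseWitness_sameSub : String × String × Int := ("ab", "cd", -1)
def pvRaiseWitnessOut_sameSub : Int := 0

def Spec_sameSub (s : String) (t : String) (K : Int) (out : Int) : Prop := out = sameSub_alt s t K
instance (s : String) (t : String) (K : Int) (out : Int) : Decidable (Spec_sameSub s t K out) := by unfold Spec_sameSub; infer_instance

-- ===== CLAIM (what is proved, stated in full; the proofs are below) =====
def Claim_equal_sameSub : Prop := ∀ (s : String) (t : String) (K : Int), Dom_sameSub s t K → Pre_sameSub s t K → Spec_sameSub s t K (sameSub s t K)

def Claim_raises_sameSub : Prop := (∀ (s : String) (t : String) (K : Int), Dom_sameSub s t K → Raises_sameSub s t K → ¬ Pre_sameSub s t K) ∧ (Dom_sameSub (pvRaiseWitness_sameSub.1) (pvRaiseWitness_sameSub.2.1) (pvRaiseWitness_sameSub.2.2) ∧ Raises_sameSub (pvRaiseWitness_sameSub.1) (pvRaiseWitness_sameSub.2.1) (pvRaiseWitness_sameSub.2.2) ∧ sameSub_alt (pvRaiseWitness_sameSub.1) (pvRaiseWitness_sameSub.2.1) (pvRaiseWitness_sameSub.2.2) = pvRaiseWitnessOut_sameSub)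

-- ===== LEMMAS AND PROOFS =====

-- per-index cost |ord s[i] - ord t[i]| (total via getD; both ports compute exactly this)
def pvC (cs ct : List Char) (i : Nat) : Int :=
  |((cs.getD i ' ').toNat : Int) - ((ct.getD i ' ').toNat : Int)|

-- prefix sums of the costs
def pvS (cs ct : List Char) : Nat → Int
  | 0 => 0
  | n + 1 => pvS cs ct n + pvC cs ct n

-- "r is the bisect_left position of x in the prefix array of length n+1"
def IsBL (n : Nat) (S : Nat → Int) (x : Int) (r : Nat) : Prop :=
  r ≤ n + 1 ∧ (∀ i < r, S i < x) ∧ (r ≤ n → x ≤ S r)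

lemma pvC_nonneg (cs ct : List Char) (i : Nat) : 0 ≤ pvC cs ct i := abs_nonneg _

lemma pvS_mono (cs ct : List Char) {i j : Nat} (h : i ≤ j) : pvS cs ct i ≤ pvS cs ct j := by
  induction j with
  | zero => simp_all
  | succ j ih =>
    rcases Nat.lt_or_ge i (j+1) with hlt | hge
    · exact le_trans (ih (by omega)) (by have := pvC_nonneg cs ct j; simp [pvS]; omega)
    · have : i = j + 1 := by omega
      simp [this]

lemma IsBL_unique {n : Nat} {S : Nat → Int} {x : Int} {r1 r2 : Nat} (h1 : IsBL n S x r1) (h2 : IsBL n S x r2) : r1 = r2 := by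
  obtain ⟨hb1, hlt1, hge1⟩ := h1
  obtain ⟨hb2, hlt2, hge2⟩ := h2
  by_contra hne
  rcases Nat.lt_or_ge r1 r2 with h | h
  · have := hlt2 r1 h
    have := hge1 (by omega)
    omega
  · have hr : r2 < r1 := by omega
    have := hlt1 r2 hr
    have := hge2 (by omega)
    omega

lemma prefix_eq (cs ct : List Char) (n : Nat) :
    ((List.range n).map (pvC cs ct)).foldl
      (fun acc c => acc ++ [PySem.List.pyGetD acc (-1) 0 + c]) [0] =
    (List.range (n + 1)).map (pvS cs ct) := by
  induction n with
  | zero => simp [pvS]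
  | succ n ih =>
    rw [List.range_succ, List.map_append, List.foldl_append, ih]
    simp only [List.map_cons, List.map_nil, List.foldl_cons, List.foldl_nil]
    rw [List.range_succ (n := n + 1), List.map_append]
    congr 1
    have hne : (List.range (n + 1)).map (pvS cs ct) ≠ [] := by simp
    rw [PySem.List.pyGetD_neg_one _ _ hne]
    rw [List.getLast_eq_getElem]
    simp [pvS]

lemma bisect_spec (cs ct : List Char) (n : Nat) (x : Int) :
    ∀ fuel lo hi, hi - lo ≤ fuel → lo ≤ hi → hi ≤ n + 1 →
    (∀ i < lo, pvS cs ct i < x) → (∀ i, hi ≤ i → i ≤ n → x ≤ pvS cs ct i) →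
    IsBL n (pvS cs ct) x (bisectLoop ((List.range (n + 1)).map (pvS cs ct)) x fuel lo hi) := by
  intro fuel
  induction fuel with
  | zero =>
    intro lo hi hf hlh hhn hlow hhigh
    simp only [bisectLoop]
    have hlo : lo = hi := by omega
    exact ⟨by omega, fun i hi' => hlow i hi', fun h => hhigh lo (by omega) h⟩
  | succ fuel ih =>
    intro lo hi hf hlh hhn hlow hhigh
    simp only [bisectLoop]
    by_cases h : lo < hi
    · simp only [h, if_pos]
      have hmid1 : lo ≤ (lo + hi) / 2 := by omega
      have hmid2 : (lo + hi) / 2 < hi := by omega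
      have hPmid : PySem.List.pyGetD ((List.range (n + 1)).map (pvS cs ct)) (((lo + hi) / 2 : Nat) : Int) 0 = pvS cs ct ((lo + hi) / 2) := by
        rw [PySem.List.pyGetD_natCast, List.getD_eq_getElem?_getD]
        simp [Nat.lt_of_lt_of_le hmid2 hhn]
      rw [hPmid]
      by_cases hc : pvS cs ct ((lo + hi) / 2) < x
      · simp only [hc, if_pos]
        exact ih ((lo + hi) / 2 + 1) hi (by omega) (by omega) hhn
          (fun i hi' => lt_of_le_of_lt (pvS_mono cs ct (by omega)) hc) hhigh
      · simp only [hc, if_neg, not_false_iff]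
        exact ih lo ((lo + hi) / 2) (by omega) (by omega) (by omega) hlow
          (fun i hi' hin => le_trans (le_of_not_gt hc) (pvS_mono cs ct hi'))
    · simp only [h, if_neg, not_false_iff]
      have hlo : lo = hi := by omega
      exact ⟨by omega, fun i hi' => hlow i hi', fun hle => hhigh lo (by omega) hle⟩

lemma while_spec (cs ct : List Char) (K : Int) (hK : 0 ≤ K) (R : Nat) (hR : R ≤ cs.length) :
    ∀ fuel left, R - left ≤ fuel → left ≤ R →
    (∀ i < left, pvS cs ct i < pvS cs ct R - K) →
    ∃ m, sameSubWhile cs ct K (fuel + 1) (pvS cs ct R - pvS cs ct left) left =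
           (pvS cs ct R - pvS cs ct m, m) ∧ IsBL cs.length (pvS cs ct) (pvS cs ct R - K) m := by
  intro fuel
  induction fuel with
  | zero =>
    intro left hf hlR hlow
    have hleft : left = R := by omega
    subst hleft
    have hcost : ¬ (K < pvS cs ct left - pvS cs ct left ∧ left < cs.length) := by
      intro ⟨h1, _⟩; omega
    simp only [sameSubWhile, hcost, if_neg, not_false_iff]
    exact ⟨left, rfl, ⟨by omega, hlow, fun _ => by omega⟩⟩
  | succ fuel ih =>
    intro left hf hlR hlow
    by_cases hc : K < pvS cs ct R - pvS cs ct left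
    · have hlt : left < R := by
        rcases Nat.lt_or_ge left R with h | h
        · exact h
        · have : left = R := by omega
          subst this; omega
      have hguard : K < pvS cs ct R - pvS cs ct left ∧ left < cs.length := ⟨hc, by omega⟩
      have hcost : pvS cs ct R - pvS cs ct left -
          |((PySem.List.pyGetD cs (left : Int) ' ').toNat : Int) -
           ((PySem.List.pyGetD ct (left : Int) ' ').toNat : Int)| =
          pvS cs ct R - pvS cs ct (left + 1) := by
        simp only [PySem.List.pyGetD_natCast, pvS, pvC]
        ring
      have := ih (left + 1) (by omega) (by omega)
        (fun i hi' => by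
          rcases Nat.lt_or_ge i left with h | h
          · exact hlow i h
          · have : i = left := by omega
            subst this; omega)
      simp only [sameSubWhile, hguard, and_self, if_pos, hcost]
      exact this
    · have hguard : ¬ (K < pvS cs ct R - pvS cs ct left ∧ left < cs.length) := by
        intro ⟨h1, _⟩; exact hc h1
      simp only [sameSubWhile, hguard, if_neg, not_false_iff]
      exact ⟨left, rfl, ⟨by omega, hlow, fun _ => by omega⟩⟩

lemma main_inv (cs ct : List Char) (K : Int) (hK : 0 ≤ K) :
    ∀ r, r ≤ cs.length →
    ∃ m, IsBL cs.length (pvS cs ct) (pvS cs ct r - K) m ∧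
      (List.range r).foldl (stepA cs ct K) (0, 0, 0) =
        ((List.range r).foldl (stepB ((List.range (cs.length + 1)).map (pvS cs ct)) cs.length K) 0,
         pvS cs ct r - pvS cs ct m, m) := by
  intro r
  induction r with
  | zero =>
    intro _
    exact ⟨0, ⟨by omega, by omega, fun _ => by simp [pvS]; omega⟩, by simp [pvS]⟩
  | succ r ih =>
    intro hr1
    obtain ⟨m, hbl, heq⟩ := ih (by omega)
    have hmr : m ≤ r := by
      by_contra hmr
      have := hbl.2.1 r (by omega)
      omega
    rw [List.range_succ, List.foldl_append, List.foldl_append, heq]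
    simp only [List.foldl_cons, List.foldl_nil]
    -- evaluate stepA
    have hcost : (pvS cs ct r - pvS cs ct m) +
        |((PySem.List.pyGetD cs (r : Int) ' ').toNat : Int) -
         ((PySem.List.pyGetD ct (r : Int) ' ').toNat : Int)| =
        pvS cs ct (r + 1) - pvS cs ct m := by
      simp only [PySem.List.pyGetD_natCast, pvS, pvC]
      ring
    obtain ⟨m', hw, hbl'⟩ := while_spec cs ct K hK (r + 1) hr1 cs.length m
      (by omega) (by omega)
      (fun i hi' => by
        have h1 := hbl.2.1 i hi'
        have h2 := pvS_mono cs ct (show r ≤ r + 1 by omega)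
        omega)
    -- evaluate stepB's bisect
    have htarget : PySem.List.pyGetD ((List.range (cs.length + 1)).map (pvS cs ct)) ((r : Int) + 1) 0
        = pvS cs ct (r + 1) := by
      have : ((r : Int) + 1) = ((r + 1 : Nat) : Int) := by push_cast; ring
      rw [this, PySem.List.pyGetD_natCast, List.getD_eq_getElem?_getD]
      simp [Nat.lt_succ_of_le hr1]
    have hbis := bisect_spec cs ct cs.length (pvS cs ct (r + 1) - K)
      (cs.length + 2) 0 (cs.length + 1) (by omega) (by omega) (by omega)
      (by omega) (fun i h1 h2 => by omega)
    have hlo : bisectLoop ((List.range (cs.length + 1)).map (pvS cs ct))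
        (pvS cs ct (r + 1) - K) (cs.length + 2) 0 (cs.length + 1) = m' :=
      IsBL_unique hbis hbl'
    refine ⟨m', hbl', ?_⟩
    simp only [stepA, stepB, hcost, htarget, hlo, hw]

-- ===== VERDICT (by name: the statement is the Claim_ definition above) =====
theorem sameSub_spec : Claim_equal_sameSub := by
  intro s t K _ hpre
  unfold Spec_sameSub
  rcases hpre with ⟨_, hK | hs⟩
  · -- 0 ≤ K : the main invariant at r = n
    obtain ⟨m, _, heq⟩ := main_inv s.toList t.toList K hK s.toList.length le_rfl
    have hcosts : (List.range s.toList.length).map (fun (i : Nat) =>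
        |((PySem.List.pyGetD s.toList (i : Int) ' ').toNat : Int) -
         ((PySem.List.pyGetD t.toList (i : Int) ' ').toNat : Int)|) =
        (List.range s.toList.length).map (pvC s.toList t.toList) := by
      apply List.map_congr_left
      intro i _
      simp [pvC]
    unfold sameSub sameSub_alt
    simp only [hcosts, prefix_eq, heq]
  · subst hs
    simp [sameSub, sameSub_alt]

@[simp] theorem sameSub_raises : Claim_raises_sameSub := by
  unfold Claim_raises_sameSub
  constructor
  · intro s t K _ hr hp
    rcases hr with ⟨hne, hK, _⟩
    rcases hp with ⟨_, h | h⟩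
    · omega
    · exact hne h
  · exact ⟨by decide, by decide, by decide⟩
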